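-- pv_equiv track=rewrite | github.com/self-798/CHUKSZ_CSC3100_coding | HW1/code/q1.py | initialize_counts
-- ===== SOURCE A (Python) =====
-- from collections import defaultdict
--
-- def initialize_counts(a):
--     counts = defaultdict(int)  # {abs(v): count}
--     zero_count = 0
--     total_distinct = 0
--
--     for ai in a:
--         if ai == 0:
--             zero_count += 1
--         else:
--             abs_ai = abs(ai)
--             counts[abs_ai] += 1
--
--     total_distinct = sum(min(count, 2) for count in counts.values())
--     if zero_count > 0:
--         total_distinct += 1
--
--     return counts, zero_count, total_distinct
-- ===== SOURCE B (Python) =====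
-- from collections import defaultdict
--
-- def initialize_counts(a):
--     counts = defaultdict(int)  # {abs(v): count}
--     zero_count = 0
--     total_distinct = 0
--     for ai in a:
--         if ai == 0:
--             if zero_count == 0:
--                 total_distinct += 1
--             zero_count += 1
--         else:
--             abs_ai = -ai if ai < 0 else ai
--             cur = counts[abs_ai]
--             if cur < 2:
--                 total_distinct += 1
--             counts[abs_ai] = cur + 1
--     return counts, zero_count, total_distinct
-- ===== Notes on version B (the rewrite author's own statement) =====
-- stated objective: alternative
-- what changed: B folds the capped-distinct total into the single counting loop (updating total_distinct incrementally when a count first reaches 1 or 2, and once for the first zero), removing A's second pass over counts.values().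
import Mathlib
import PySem

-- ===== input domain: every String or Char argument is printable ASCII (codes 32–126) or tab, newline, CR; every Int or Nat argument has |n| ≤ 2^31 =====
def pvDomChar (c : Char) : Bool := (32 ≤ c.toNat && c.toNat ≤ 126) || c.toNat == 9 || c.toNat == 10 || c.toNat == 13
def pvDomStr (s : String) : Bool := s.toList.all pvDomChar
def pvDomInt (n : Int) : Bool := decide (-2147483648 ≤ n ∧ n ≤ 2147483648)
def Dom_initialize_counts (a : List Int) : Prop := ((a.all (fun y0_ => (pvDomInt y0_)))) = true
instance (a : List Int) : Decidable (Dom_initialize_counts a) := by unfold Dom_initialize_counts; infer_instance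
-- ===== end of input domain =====

-- B merges A's second pass (sum of min(count,2) over counts.values()) into the counting
-- loop, maintaining total_distinct incrementally; same return value, one pass instead of two.

-- ===== PORT A =====
-- A's counting loop step: state (counts, zero_count)
def icA_step (st : PySem.Dict Int Int × Int) (ai : Int) : PySem.Dict Int Int × Int :=
  if ai = 0 then (st.1, st.2 + 1)
  else (st.1.modify (if ai < 0 then -ai else ai) 0 (· + 1), st.2)

def initialize_counts (a : List Int) : (List (Int × Int)) × Int × Int :=
  let st := a.foldl icA_step (PySem.Dict.empty, 0)
  let total := st.1.values.foldl (fun acc c => acc + min c 2) 0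
  let total := if st.2 > 0 then total + 1 else total
  (st.1.items, st.2, total)

-- ===== PORT B =====
-- B's one-pass step: state (counts, zero_count, total_distinct)
def icB_step (st : PySem.Dict Int Int × Int × Int) (ai : Int) : PySem.Dict Int Int × Int × Int :=
  if ai = 0 then
    (st.1, st.2.1 + 1, if st.2.1 = 0 then st.2.2 + 1 else st.2.2)
  else
    let ab := if ai < 0 then -ai else ai
    let cur := st.1.getD ab 0   -- defaultdict read: inserts 0 then is overwritten below
    (st.1.insert ab (cur + 1), st.2.1, if cur < 2 then st.2.2 + 1 else st.2.2)

def initialize_counts_alt (a : List Int) : (List (Int × Int)) × Int × Int :=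
  let st := a.foldl icB_step (PySem.Dict.empty, 0, 0)
  (st.1.items, st.2.1, st.2.2)

-- ===== PRECONDITION & SPEC =====
def Spec_initialize_counts (a : List Int) (out : (List (Int × Int)) × Int × Int) : Prop := out = initialize_counts_alt a
instance (a : List Int) (out : (List (Int × Int)) × Int × Int) : Decidable (Spec_initialize_counts a out) := by unfold Spec_initialize_counts; infer_instance

-- ===== CLAIM (what is proved, stated in full; the proofs are below) =====
def Claim_equal_initialize_counts : Prop := ∀ (a : List Int), Dom_initialize_counts a → Spec_initialize_counts a (initialize_counts a)

-- ===== LEMMAS AND PROOFS =====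

-- capped sum of the counts in d
def icS (d : PySem.Dict Int Int) : Int := (d.items.map (fun p => min p.2 2)).sum

lemma ic_foldl_min2 (l : List Int) (s : Int) :
    l.foldl (fun acc c => acc + min c 2) s = s + (l.map (fun c => min c 2)).sum := by
  induction l generalizing s with
  | nil => simp
  | cons x xs ih => simp [List.foldl_cons, ih]; ring

lemma ic_modify_eq_insert (d : PySem.Dict Int Int) (k : Int) :
    d.modify k 0 (· + 1) = d.insert k (d.getD k 0 + 1) := rfl

lemma ic_replace_sum (l : List (Int × Int)) (k v : Int)
    (hnd : (l.map Prod.fst).Nodup) (hm : (k, v) ∈ l) :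
    ((l.map (fun p => if p.1 == k then (k, v + 1) else p)).map (fun p => min p.2 2)).sum
      = (l.map (fun p => min p.2 2)).sum - min v 2 + min (v + 1) 2 := by
  induction l with
  | nil => simp at hm
  | cons p rest ih =>
    simp only [List.map_cons, List.nodup_cons, List.mem_map] at hnd
    by_cases hk : p.1 = k
    · have hpv : p = (k, v) := by
        rcases List.mem_cons.mp hm with h | h
        · exact h.symm
        · exact absurd ⟨(k, v), h, by simp [hk]⟩ hnd.1
      have hrest : rest.map (fun q => if q.1 == k then (k, v + 1) else q) = rest := by
        rw [List.map_congr_left (g := id) ?_, List.map_id]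
        intro q hq
        have : q.1 ≠ k := fun he => hnd.1 ⟨q, hq, by simp [he, hk]⟩
        simp [this]
      simp only [List.map_cons, hpv, List.sum_cons, hrest, beq_self_eq_true, if_pos]
      ring
    · have hm' : (k, v) ∈ rest := by
        rcases List.mem_cons.mp hm with h | h
        · exact absurd (by rw [← h]) hk
        · exact h
      have := ih hnd.2 hm'
      have hne : (p.1 == k) = false := by simp [hk]
      simp only [List.map_cons, List.sum_cons, hne, Bool.false_eq_true, if_false, this]
      ring

lemma ic_sum_insert (d : PySem.Dict Int Int) (k : Int) (hnd : d.keys.Nodup) :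
    icS (d.insert k (d.getD k 0 + 1)) = icS d + (if d.getD k 0 < 2 then 1 else 0) := by
  by_cases hc : d.contains k
  · obtain ⟨v, hv⟩ : ∃ v, d.get? k = some v := by
      have := PySem.Dict.contains_eq_isSome_get? (d := d) (k := k)
      rw [hc] at this
      exact Option.isSome_iff_exists.mp this.symm
    have hgd : d.getD k 0 = v := PySem.Dict.getD_of_get?_eq_some d 0 hv
    have hmem : (k, v) ∈ d.items := PySem.Dict.mem_items_of_get?_eq_some d hv
    rw [icS, PySem.Dict.items_insert_of_contains (h := hc), hgd]
    rw [ic_replace_sum d.items k v (by simpa [PySem.Dict.keys] using hnd) hmem]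
    rw [icS]
    have : min (v + 1) 2 - min v 2 = if v < 2 then 1 else 0 := by
      rcases le_or_gt 2 v with h | h
      · rw [min_eq_right (by omega), min_eq_right h, if_neg (by omega)]; ring
      · rw [min_eq_left (by omega), min_eq_left (by omega), if_pos h]; ring
    omega
  · have hgd : d.getD k 0 = 0 := PySem.Dict.getD_of_not_contains d 0 (by simpa using hc)
    rw [icS, PySem.Dict.items_insert_of_not_contains (h := by simpa using hc), hgd]
    simp [icS]

lemma ic_loop_inv (l : List Int) (d : PySem.Dict Int Int) (z t : Int)
    (hnd : d.keys.Nodup) (hz : 0 ≤ z) (ht : t = icS d + (if 0 < z then 1 else 0)) :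
    l.foldl icB_step (d, z, t) =
      ((l.foldl icA_step (d, z)).1, (l.foldl icA_step (d, z)).2,
        icS (l.foldl icA_step (d, z)).1 + (if 0 < (l.foldl icA_step (d, z)).2 then 1 else 0)) := by
  induction l generalizing d z t with
  | nil => simp [ht]
  | cons x xs ih =>
    by_cases hx : x = 0
    · have hA : icA_step (d, z) x = (d, z + 1) := by simp [icA_step, hx]
      have hB : icB_step (d, z, t) x = (d, z + 1, icS d + 1) := by
        have h3 : (if z = 0 then t + 1 else t) = icS d + 1 := by
          rw [ht]; split_ifs <;> omega
        simp [icB_step, hx, h3]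
      rw [List.foldl_cons, List.foldl_cons, hA, hB]
      exact ih d (z + 1) _ hnd (by omega) (by rw [if_pos (by omega)])
    · have h3 : (if d.getD (if x < 0 then -x else x) 0 < 2 then t + 1 else t)
          = icS (d.insert (if x < 0 then -x else x) (d.getD (if x < 0 then -x else x) 0 + 1))
              + (if 0 < z then 1 else 0) := by
        rw [ic_sum_insert d _ hnd, ht]
        split_ifs <;> ring
      have hA : icA_step (d, z) x
          = (d.insert (if x < 0 then -x else x) (d.getD (if x < 0 then -x else x) 0 + 1), z) := by
        rw [icA_step, if_neg hx, ic_modify_eq_insert]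
      have hB : icB_step (d, z, t) x
          = (d.insert (if x < 0 then -x else x) (d.getD (if x < 0 then -x else x) 0 + 1), z,
             icS (d.insert (if x < 0 then -x else x) (d.getD (if x < 0 then -x else x) 0 + 1))
               + (if 0 < z then 1 else 0)) := by
        simp only [icB_step, if_neg hx, h3]
      rw [List.foldl_cons, List.foldl_cons, hA, hB]
      exact ih _ z _ (PySem.Dict.nodup_keys_insert _ _ _ hnd) hz rfl

-- ===== VERDICT (by name: the statement is the Claim_ definition above) =====
theorem initialize_counts_spec : Claim_equal_initialize_counts := by
  intro a _
  unfold Spec_initialize_counts initialize_counts initialize_counts_alt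
  rw [ic_loop_inv a PySem.Dict.empty 0 0 (by decide) le_rfl (by decide)]
  have hv : ∀ d : PySem.Dict Int Int,
      d.values.foldl (fun acc c => acc + min c 2) 0 = icS d := by
    intro d
    rw [ic_foldl_min2]
    simp only [icS, PySem.Dict.values, List.map_map, zero_add]
    rfl
  simp only [hv]
  congr 1
  congr 1
  split_ifs with h <;> omega
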